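-- pv_equiv track=rewrite | github.com/cpina00/tech-interview | list/unique_words.py | unique_word
-- ===== SOURCE A (Python) =====
-- def unique_word(words: list[str]) -> list[bool]:
--     """
--     con esta estructura, creamos un diccionario vacio, luego recorremos la lista.
--     Por cada elemento, consultamos si existe en el diccionario, si existe, se marca
--     Falso, y continuamos con la siguiente palabra. si no existe, marcamos Verdadero
--     y lo agregamos al diccionario.
--
--     De esta forma, solo hay que recorrer la lsta 1 vez para verificar lo solicitado,
--     teniendo una complejidad O(n), mucho mejor que la solución anterior.
--     """
--     result = []
--     unique_works = {}
--     for word in words: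
--         if unique_works.get(word, False):
--             result.append(False)
--         else:
--             unique_works[word] = 1
--             result.append(True)
--
--     return result
-- ===== SOURCE B (Python) =====
-- def unique_word(words: list[str]) -> list[bool]:
--     # Two passes: first build a table of each word's first-occurrence index,
--     # then mark position i True exactly when it IS that first occurrence.
--     first_index = {}
--     for i, word in enumerate(words):
--         if word not in first_index:
--             first_index[word] = i
--     return [first_index[word] == i for i, word in enumerate(words)]
-- ===== Notes on version B (the rewrite author's own statement) =====
-- stated objective: alternative
-- what changed: Replaces A's single check-and-insert pass (seen-dict updated while emitting booleans) with two separate passes: first build a first-occurrence-index table, then derive each boolean by comparing the position with the stored first index.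
import Mathlib
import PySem

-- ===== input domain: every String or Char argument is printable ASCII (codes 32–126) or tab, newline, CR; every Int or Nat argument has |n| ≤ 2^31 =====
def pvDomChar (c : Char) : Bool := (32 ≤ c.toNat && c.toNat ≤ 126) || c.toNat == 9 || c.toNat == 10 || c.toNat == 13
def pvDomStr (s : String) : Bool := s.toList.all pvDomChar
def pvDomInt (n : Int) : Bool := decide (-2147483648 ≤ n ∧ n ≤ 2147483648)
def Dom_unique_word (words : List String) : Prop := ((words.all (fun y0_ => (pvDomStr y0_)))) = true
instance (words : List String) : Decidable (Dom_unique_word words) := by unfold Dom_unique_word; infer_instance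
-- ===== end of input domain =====

-- B replaces A's single check-and-insert pass with two passes: build a
-- first-occurrence-index table, then compare each position with its stored
-- first index (objective: alternative decomposition, same O(n) cost).

-- ===== PORT A =====
-- one pass: emit the boolean and update the seen-dict in the same step;
-- 'unique_works.get(word, False)' is truthy iff the stored value (always 1) is ≠ 0
def unique_word (words : List String) : List Bool :=
  (words.foldl
    (fun (st : List Bool × PySem.Dict String Int) word =>
      if st.2.getD word 0 ≠ 0 then (st.1 ++ [false], st.2)
      else (st.1 ++ [true], st.2.insert word 1))
    ([], PySem.Dict.empty)).1

-- ===== PORT B =====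
-- first pass of Source B: record each word's first index (only when not yet a key)
def firstIndexTable (words : List String) : PySem.Dict String Int :=
  (PySem.List.enumerate words 0).foldl
    (fun (d : PySem.Dict String Int) p =>
      if d.contains p.2 = false then d.insert p.2 p.1 else d)
    PySem.Dict.empty
-- second pass: 'first_index[word] == i'; the key is always present (every word of
-- the list was inserted in the first pass), so getD with any default is exact
def unique_word_alt (words : List String) : List Bool :=
  (PySem.List.enumerate words 0).map
    (fun p => (firstIndexTable words).getD p.2 (-1) == p.1)

-- ===== PRECONDITION & SPEC =====
def Spec_unique_word (words : List String) (out : List Bool) : Prop := out = unique_word_alt words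
instance (words : List String) (out : List Bool) : Decidable (Spec_unique_word words out) := by unfold Spec_unique_word; infer_instance

-- ===== CLAIM (what is proved, stated in full; the proofs are below) =====
def Claim_equal_unique_word : Prop := ∀ (words : List String), Dom_unique_word words → Spec_unique_word words (unique_word words)

-- ===== LEMMAS AND PROOFS =====

-- reference: marks w True iff w not among the already-seen words
def marks : List String → List String → List Bool
  | _, [] => []
  | seen, w :: ws => (!decide (w ∈ seen)) :: marks (w :: seen) ws

-- first index of w in xs, positions counted from s
def fIdx (w : String) : List String → Int → Option Int
  | [], _ => none
  | x :: xs, s => if x = w then some s else fIdx w xs (s + 1)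

lemma fIdx_append_self (w : String) (ws : List String) :
    ∀ (pre : List String) (s : Int),
      fIdx w (pre ++ w :: ws) s =
        if w ∈ pre then fIdx w pre s else some (s + pre.length) := by
  intro pre
  induction pre with
  | nil => intro s; simp [fIdx]
  | cons x xs ih =>
    intro s
    by_cases hx : x = w
    · subst hx; simp [fIdx]
    · simp only [List.cons_append, fIdx, if_neg hx, ih (s + 1), List.mem_cons,
        List.length_cons]
      have hwx : ¬ w = x := fun h' => hx h'.symm
      rcases Decidable.em (w ∈ xs) with h | h
      · simp [h]
      · simp [h, hwx]
        ring_nf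

lemma fIdx_mem_lt (w : String) :
    ∀ (pre : List String) (s : Int), w ∈ pre →
      ∃ j, fIdx w pre s = some j ∧ j < s + pre.length := by
  intro pre
  induction pre with
  | nil => intro s h; simp at h
  | cons x xs ih =>
    intro s h
    by_cases hx : x = w
    · exact ⟨s, by simp [fIdx, hx], by simp⟩
    · have hm : w ∈ xs := by
        rcases List.mem_cons.mp h with h' | h'
        · exact absurd h'.symm hx
        · exact h'
      rcases ih (s + 1) hm with ⟨j, hj, hlt⟩
      refine ⟨j, by simp [fIdx, hx, hj], by simp only [List.length_cons]; push_cast; omega⟩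

-- the first pass's dict looked up: earlier entries of the dict win, then fIdx
lemma fi_get (w : String) :
    ∀ (xs : List String) (s : Int) (d : PySem.Dict String Int),
      ((PySem.List.enumerate xs s).foldl
        (fun (d : PySem.Dict String Int) p =>
          if d.contains p.2 = false then d.insert p.2 p.1 else d) d).get? w =
        (d.get? w).or (fIdx w xs s) := by
  intro xs
  induction xs with
  | nil => intro s d; simp [PySem.List.enumerate_nil, fIdx]
  | cons x xs ih =>
    intro s d
    rw [PySem.List.enumerate_cons, List.foldl_cons]
    by_cases hc : d.contains x = true
    · rw [if_neg (by simp [hc]), ih]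
      by_cases hw : x = w
      · subst hw
        have hs : (d.get? x).isSome := by
          rw [← PySem.Dict.contains_eq_isSome_get?]; exact hc
        rcases Option.isSome_iff_exists.mp hs with ⟨v, hv⟩
        simp [hv, fIdx]
      · simp [fIdx, hw]
    · rw [if_pos (by simpa using hc), ih]
      by_cases hw : x = w
      · subst hw
        have hn : d.get? x = none := by
          rw [PySem.Dict.get?_eq_none_iff_contains]; simpa using hc
        simp [PySem.Dict.get?_insert_self, hn, fIdx]
      · rw [PySem.Dict.get?_insert_of_ne _ _ (fun h => hw h.symm)]
        simp [fIdx, hw]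

-- the second pass over a suffix equals the reference run with the prefix as seen-list
lemma alt_marks :
    ∀ (xs pre : List String),
      (PySem.List.enumerate xs (pre.length : Int)).map
        (fun p => (firstIndexTable (pre ++ xs)).getD p.2 (-1) == p.1) =
        marks pre.reverse xs := by
  intro xs
  induction xs with
  | nil => intro pre; simp [PySem.List.enumerate_nil, marks]
  | cons w ws ih =>
    intro pre
    rw [PySem.List.enumerate_cons, List.map_cons, marks]
    have hget : (firstIndexTable (pre ++ w :: ws)).get? w =
        fIdx w (pre ++ w :: ws) 0 := by
      rw [firstIndexTable, fi_get]; simp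
    congr 1
    · -- head
      by_cases hm : w ∈ pre
      · rcases fIdx_mem_lt w pre 0 hm with ⟨j, hj, hlt⟩
        rw [fIdx_append_self, if_pos hm, hj] at hget
        rw [PySem.Dict.getD_of_get?_eq_some _ _ hget]
        simp [hm] at hlt ⊢
        omega
      · rw [fIdx_append_self, if_neg hm] at hget
        rw [PySem.Dict.getD_of_get?_eq_some _ _ (by simpa using hget)]
        simp [hm]
    · -- tail: restart with pre ++ [w] as the prefix
      have := ih (pre ++ [w])
      simp only [List.append_assoc, List.singleton_append, List.length_append,
        List.length_singleton, List.reverse_append, List.reverse_singleton,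
        List.singleton_append] at this
      push_cast at this
      rw [← this]

-- A's single pass equals the reference run, given the dict encodes the seen-list
lemma a_marks :
    ∀ (xs : List String) (acc : List Bool) (d : PySem.Dict String Int) (seen : List String),
      (∀ u, d.getD u 0 ≠ 0 ↔ u ∈ seen) →
      (xs.foldl
        (fun (st : List Bool × PySem.Dict String Int) word =>
          if st.2.getD word 0 ≠ 0 then (st.1 ++ [false], st.2)
          else (st.1 ++ [true], st.2.insert word 1))
        (acc, d)).1 = acc ++ marks seen xs := by
  intro xs
  induction xs with
  | nil => intro acc d seen _; simp [marks]
  | cons w ws ih =>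
    intro acc d seen hinv
    rw [List.foldl_cons]
    by_cases hm : w ∈ seen
    · rw [if_pos (by exact (hinv w).mpr hm)]
      rw [ih _ d (w :: seen) ?_, marks]
      · simp [hm]
      · intro u
        rw [hinv u, List.mem_cons]
        constructor
        · exact fun h => Or.inr h
        · rintro (rfl | h)
          · exact hm
          · exact h
    · rw [if_neg (by intro h; exact hm ((hinv w).mp h))]
      rw [ih _ (d.insert w 1) (w :: seen) ?_, marks]
      · simp [hm]
      · intro u
        rw [PySem.Dict.getD_insert]
        by_cases hu : u = w
        · simp [hu]
        · simp [hu, hinv u]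

-- ===== VERDICT (by name: the statement is the Claim_ definition above) =====
theorem unique_word_spec : Claim_equal_unique_word := by
  intro words _
  unfold Spec_unique_word
  have hA : unique_word words = marks [] words := by
    rw [unique_word, a_marks words [] PySem.Dict.empty []
      (by intro u; simp [PySem.Dict.getD_empty])]
    simp
  have hB : unique_word_alt words = marks [] words := by
    have := alt_marks words []
    simpa [unique_word_alt] using this
  rw [hA, hB]
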